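-- pv_equiv track=rewrite | github.com/mvratnam10/ISO15022TestMessageGenarator | ApplyConfigToTemplates.py | getnextchar
-- ===== SOURCE A (Python) =====
-- def getnextchar(onechar):
--     # OneChar = upper(OneChar)
--     alphanumstrupple = ('A', 'B', 'C', 'D', 'E', 'F', 'G',
--                         'H', 'I', 'J', 'K', 'L', 'M', 'N', 'O', 'P',
--                         'Q', 'R', 'S', 'T', 'U', 'V', 'W', 'X', 'Y',
--                         'Z', '0', '1', '2', '3', '4', '5', '6', '7',
--                         '8', '9')
--
--     if onechar == '9':
--         return 'A'
--
--     location = 0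
--     for X in alphanumstrupple:
--         location += 1
--         if X == onechar:
--             return alphanumstrupple[location]
--     return 'A'
-- ===== SOURCE B (Python) =====
-- def getnextchar(onechar):
--     # closed-form successor by character arithmetic instead of a table scan
--     if onechar == '9':
--         return 'A'
--     if isinstance(onechar, str) and len(onechar) == 1:
--         o = ord(onechar)
--         if ord('A') <= o <= ord('Y') or ord('0') <= o <= ord('8'):
--             return chr(o + 1)
--         if onechar == 'Z':
--             return '0'
--     return 'A'
-- ===== Notes on version B (the rewrite author's own statement) =====
-- stated objective: idiomatic
-- what changed: Replaces the 36-element tuple and its linear scan-with-counter by closed-form ord/chr successor arithmetic on a single character, with the two wrap-around cases handled explicitly.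
import Mathlib
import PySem

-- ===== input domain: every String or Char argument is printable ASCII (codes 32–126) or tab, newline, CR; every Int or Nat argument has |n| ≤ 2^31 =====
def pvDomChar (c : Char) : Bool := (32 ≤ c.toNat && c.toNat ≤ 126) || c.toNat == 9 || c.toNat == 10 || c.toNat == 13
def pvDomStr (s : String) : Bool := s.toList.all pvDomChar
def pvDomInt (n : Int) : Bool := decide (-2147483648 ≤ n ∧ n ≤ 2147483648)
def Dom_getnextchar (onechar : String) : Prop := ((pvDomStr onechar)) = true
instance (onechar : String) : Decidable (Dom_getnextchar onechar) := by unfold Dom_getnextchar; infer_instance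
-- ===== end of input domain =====

-- B replaces A's 36-element tuple and linear scan by closed-form ord/chr successor arithmetic (idiomatic, O(1)).

-- ===== PORT A =====
def gncTuple : List String :=
  ["A", "B", "C", "D", "E", "F", "G",
   "H", "I", "J", "K", "L", "M", "N", "O", "P",
   "Q", "R", "S", "T", "U", "V", "W", "X", "Y",
   "Z", "0", "1", "2", "3", "4", "5", "6", "7",
   "8", "9"]

-- the for-loop with the running `location` counter; `.getD "A"` is only a totality
-- default for the Option of pyGet? (the index is in range whenever the branch is reached,
-- since the final table entry was returned early)
def gncLoop (onechar : String) (location : Nat) (rest : List String) : String :=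
  match rest with
  | [] => "A"
  | X :: xs =>
    if X = onechar then (PySem.List.pyGet? gncTuple ((location + 1 : Nat) : Int)).getD "A"
    else gncLoop onechar (location + 1) xs

def getnextchar (onechar : String) : String :=
  if onechar = "9" then "A"
  else gncLoop onechar 0 gncTuple

-- ===== PORT B =====
def getnextchar_alt (onechar : String) : String :=
  if onechar = "9" then "A"
  else
    match onechar.toList with
    | [c] =>  -- len(onechar) == 1
      if ('A'.toNat ≤ c.toNat ∧ c.toNat ≤ 'Y'.toNat) ∨ ('0'.toNat ≤ c.toNat ∧ c.toNat ≤ '8'.toNat)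
      then String.ofList [Char.ofNat (c.toNat + 1)]  -- chr(ord(onechar) + 1)
      else if onechar = "Z" then "0" else "A"
    | _ => "A"

-- ===== PRECONDITION & SPEC =====
def Spec_getnextchar (onechar : String) (out : String) : Prop := out = getnextchar_alt onechar
instance (onechar : String) (out : String) : Decidable (Spec_getnextchar onechar out) := by unfold Spec_getnextchar; infer_instance

-- ===== CLAIM (what is proved, stated in full; the proofs are below) =====
def Claim_equal_getnextchar : Prop := ∀ (onechar : String), Dom_getnextchar onechar → Spec_getnextchar onechar (getnextchar onechar)

-- ===== LEMMAS AND PROOFS =====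

lemma gncLoop_notin (s : String) (loc : Nat) (rest : List String)
    (h : ∀ X ∈ rest, X ≠ s) : gncLoop s loc rest = "A" := by
  induction rest generalizing loc with
  | nil => rfl
  | cons X xs ih =>
    unfold gncLoop
    rw [if_neg (h X (List.mem_cons_self))]
    exact ih _ (fun Y hY => h Y (List.mem_cons_of_mem _ hY))

lemma gnc_single (c : Char) (h : c.toNat ≤ 126) :
    getnextchar (String.ofList [c]) = getnextchar_alt (String.ofList [c]) := by
  have hc : c = Char.ofNat c.toNat := (Char.ofNat_toNat c).symm
  rcases Nat.lt_or_ge c.toNat 127 with h' | h'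
  · set n := c.toNat with hn
    rw [hc]
    clear_value n
    clear hc hn h c
    interval_cases n <;> decide
  · omega

theorem getnextchar_spec_aux (s : String) (hDom : Dom_getnextchar s) :
    getnextchar s = getnextchar_alt s := by
  rcases hl : s.toList with _ | ⟨c, _ | ⟨d, t⟩⟩
  · -- empty string
    have hs : s = "" := by
      have := congrArg String.ofList hl
      simpa using this
    subst hs; decide
  · -- single character
    have hs : s = String.ofList [c] := by
      have := congrArg String.ofList hl
      simpa using this
    have hcd : pvDomChar c = true := by
      unfold Dom_getnextchar pvDomStr at hDom
      rw [hl] at hDom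
      simpa using hDom
    have hle : c.toNat ≤ 126 := by
      simp only [pvDomChar, Bool.or_eq_true, Bool.and_eq_true, decide_eq_true_eq,
        beq_iff_eq] at hcd
      omega
    rw [hs]; exact gnc_single c hle
  · -- two or more characters: both sides return "A"
    have hne : ∀ X ∈ gncTuple, X ≠ s := by
      intro X hX
      rintro rfl
      fin_cases hX <;> simp at hl
    have h9 : s ≠ "9" := (hne "9" (by decide)).symm
    rw [getnextchar, if_neg (fun h => h9 h), gncLoop_notin s 0 gncTuple hne,
      getnextchar_alt, if_neg (fun h => h9 h), hl]

-- ===== VERDICT (by name: the statement is the Claim_ definition above) =====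
theorem getnextchar_spec : Claim_equal_getnextchar := by
  intro s hDom
  unfold Spec_getnextchar
  exact getnextchar_spec_aux s hDom
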